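-- pv_equiv track=rewrite | github.com/wellFoundedDevelopers/Algorithm | src/main/kotlin/heejik/56week/이차원 배열과 연산.py | sort_row
-- ===== SOURCE A (Python) =====
-- def sort_row(arr):
--     new_arr = []
--     for row in arr:
--         new_arr.append(define_new_arr(row))
--
--     max_len = max(map(lambda x: len(x), new_arr))
--     for row in new_arr:
--         row += [0 for _ in range(max_len - len(row))]
--
--     return new_arr
--
-- def define_new_arr(arr):
--     arr = list(filter(lambda x: x != 0, arr))
--     new_arr = []
--     count_of_num = dict()
--
--     for num in arr:
--         if num not in count_of_num:
--             count_of_num[num] = 1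
--         else:
--             count_of_num[num] += 1
--     sorted_data = sorted(count_of_num.items(), key=lambda x: (x[1], x[0]))
--
--     for num, count in sorted_data:
--         new_arr.append(num)
--         new_arr.append(count)
--
--     return new_arr
-- ===== SOURCE B (Python) =====
-- # B: counts each row by sorting then scanning runs (no dict); builds padded rows as new lists.
-- def sort_row(arr):
--     new_rows = [_row_pairs(row) for row in arr]
--     width = max((len(r) for r in new_rows), default=0)
--     return [r + [0] * (width - len(r)) for r in new_rows]
--
-- def _row_pairs(row):
--     vals = sorted(v for v in row if v != 0)
--     pairs = []
--     while vals:
--         v = vals[0]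
--         rest = vals[1:]
--         run = 0
--         while run < len(rest) and rest[run] == v:
--             run += 1
--         pairs.append((v, 1 + run))
--         vals = rest[run:]
--     pairs.sort(key=lambda p: (p[1], p[0]))
--     return [x for p in pairs for x in p]
-- ===== Notes on version B (the rewrite author's own statement) =====
-- stated objective: alternative
-- what changed: Per-row counting is done by sorting the nonzero values and scanning maximal runs (sort-then-group) instead of accumulating a dict of counts, and padded rows are built as fresh lists instead of being mutated in place.
-- outside the precondition, e.g. on sort_row([]): A raises ValueError, B returns []
import Mathlib
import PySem

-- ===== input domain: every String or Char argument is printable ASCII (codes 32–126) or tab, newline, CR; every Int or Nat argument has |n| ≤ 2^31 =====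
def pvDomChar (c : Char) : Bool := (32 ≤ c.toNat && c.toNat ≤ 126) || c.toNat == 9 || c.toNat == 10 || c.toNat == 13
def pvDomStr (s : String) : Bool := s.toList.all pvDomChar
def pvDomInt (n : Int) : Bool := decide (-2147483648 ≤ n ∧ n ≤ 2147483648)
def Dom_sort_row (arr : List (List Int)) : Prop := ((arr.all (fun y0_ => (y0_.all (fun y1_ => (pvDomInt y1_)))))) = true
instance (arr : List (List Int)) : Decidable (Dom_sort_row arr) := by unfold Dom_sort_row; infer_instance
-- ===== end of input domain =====

-- B replaces A's dict-of-counts per row with sort-then-scan-runs grouping, and builds padded rows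
-- as fresh lists where A pads its intermediate rows in place (that mutation is internal to A, so
-- only the return value is at stake).

-- ===== PORT A =====
-- define_new_arr: drop zeros, count with a dict, sort items by (count, value), interleave value/count.
def pvDefineNewArr (row : List Int) : List Int :=
  let arr := row.filter (fun x => x != 0)
  let d := arr.foldl
    (fun (d : PySem.Dict Int Int) num =>
      if d.contains num = false then d.insert num 1
      else d.insert num (d.getD num 0 + 1))   -- d[num] += 1 (num is contained here, so getD reads d[num])
    PySem.Dict.empty
  let sorted_data := PySem.List.sorted2 d.items (fun p => p.2) (fun p => p.1)
  sorted_data.foldl (fun acc p => (acc ++ [p.1]) ++ [p.2]) []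

def sort_row (arr : List (List Int)) : List (List Int) :=
  let new_arr := arr.map pvDefineNewArr
  -- max(map(len, new_arr)) raises ValueError iff new_arr = []; that input (arr = []) is outside Pre_
  let max_len := (PySem.List.max? (new_arr.map (fun x => x.length)) (fun y => y)).getD 0
  new_arr.map (fun row => row ++ List.replicate (max_len - row.length) 0)

-- ===== PORT B =====
-- scan the maximal runs of a sorted value list into (value, run length) pairs (Source B's while loop:
-- run = length of the leading run of vals[1:] equal to vals[0], then continue on vals[1+run:])
def pvGroup : List Int → List (Int × Int)
  | [] => []
  | v :: rest =>
    let run := (rest.takeWhile (fun x => x == v)).length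
    (v, 1 + (run : Int)) :: pvGroup (rest.drop run)
termination_by l => l.length
decreasing_by
  simp only [List.length_drop, List.length_cons]
  omega

def pvRowPairs (row : List Int) : List Int :=
  let vals := PySem.List.sorted (row.filter (fun v => v != 0)) (fun y => y)
  let pairs := PySem.List.sorted2 (pvGroup vals) (fun p => p.2) (fun p => p.1)
  pairs.flatMap (fun p => [p.1, p.2])

def sort_row_alt (arr : List (List Int)) : List (List Int) :=
  let new_rows := arr.map pvRowPairs
  let width := PySem.List.maxD (new_rows.map (fun r => r.length)) (fun y => y) 0
  new_rows.map (fun r => r ++ List.replicate (width - r.length) 0)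

-- ===== PRECONDITION & SPEC =====
-- A raises ValueError (max() of an empty sequence) exactly on arr = []; nothing else is excluded.
def Pre_sort_row (arr : List (List Int)) : Prop := arr ≠ []
instance (arr : List (List Int)) : Decidable (Pre_sort_row arr) := by unfold Pre_sort_row; infer_instance
def pvWitness_sort_row : List (List Int) := [[1, 2, 2, 0], [], [3]]

def Spec_sort_row (arr : List (List Int)) (out : List (List Int)) : Prop := out = sort_row_alt arr
instance (arr : List (List Int)) (out : List (List Int)) : Decidable (Spec_sort_row arr out) := by unfold Spec_sort_row; infer_instance

-- ===== CLAIM (what is proved, stated in full; the proofs are below) =====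
def Claim_equal_sort_row : Prop := ∀ (arr : List (List Int)), Dom_sort_row arr → Pre_sort_row arr → Spec_sort_row arr (sort_row arr)

-- ===== LEMMAS AND PROOFS =====

theorem pv_dropWhile_eq_drop (l : List Int) (p : Int → Bool) :
    l.drop (l.takeWhile p).length = l.dropWhile p := by
  induction l with
  | nil => rfl
  | cons x t ih => by_cases h : p x <;> simp [h, ih]

theorem pv_lt_of_mem_dropWhile (v : Int) (l : List Int) (hp : l.Pairwise (· ≤ ·))
    (hle : ∀ y ∈ l, v ≤ y) : ∀ x ∈ l.dropWhile (fun x => x == v), v < x := by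
  induction l with
  | nil => simp
  | cons y t ih =>
    rw [List.pairwise_cons] at hp
    by_cases hy : (y == v) = true
    · rw [List.dropWhile_cons, if_pos hy]
      exact ih hp.2 (fun z hz => hle z (List.mem_cons_of_mem _ hz))
    · rw [List.dropWhile_cons, if_neg hy]
      intro x hx
      have hvy : v < y :=
        lt_of_le_of_ne (hle y List.mem_cons_self) (fun h => hy (by simp [h.symm]))
      rcases List.mem_cons.1 hx with rfl | hx
      · exact hvy
      · exact lt_of_lt_of_le hvy (hp.1 x hx)

theorem pv_group_mem (s : List Int) (hs : s.Pairwise (· ≤ ·)) (p : Int × Int) :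
    p ∈ pvGroup s ↔ p.1 ∈ s ∧ p.2 = (s.count p.1 : Int) := by
  induction s using pvGroup.induct with
  | case1 => simp [pvGroup]
  | case2 v rest run ih =>
    rw [List.pairwise_cons] at hs
    have hvrest := hs.1
    have hrp := hs.2
    have hdw := pv_dropWhile_eq_drop rest (fun x => x == v)
    have htv : ∀ x ∈ rest.takeWhile (fun x => x == v), x = v :=
      fun x hx => by simpa using List.mem_takeWhile_imp hx
    have hdsort : (rest.dropWhile (fun x => x == v)).Pairwise (· ≤ ·) :=
      hrp.sublist (List.dropWhile_sublist _)
    have hvd : ∀ x ∈ rest.dropWhile (fun x => x == v), v < x :=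
      pv_lt_of_mem_dropWhile v rest hrp hvrest
    have hsplit : rest = rest.takeWhile (fun x => x == v) ++ rest.dropWhile (fun x => x == v) :=
      (List.takeWhile_append_dropWhile).symm
    have hcv : (v :: rest).count v = 1 + run := by
      have h1 : (rest.takeWhile (fun x => x == v)).count v
          = (rest.takeWhile (fun x => x == v)).length :=
        List.count_eq_length.2 (fun b hb => by simp [htv b hb])
      have h2 : (rest.dropWhile (fun x => x == v)).count v = 0 :=
        List.count_eq_zero.2 (fun h => lt_irrefl v (hvd v h))
      rw [List.count_cons_self]
      conv_lhs => rw [hsplit]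
      rw [List.count_append, h1, h2]
      show (rest.takeWhile (fun x => x == v)).length + 0 + 1
          = 1 + (rest.takeWhile (fun x => x == v)).length
      omega
    have hcne : ∀ x : Int, x ≠ v →
        (v :: rest).count x = (rest.dropWhile (fun x => x == v)).count x := by
      intro x hx
      have h0 : (rest.takeWhile (fun x => x == v)).count x = 0 :=
        List.count_eq_zero.2 (fun h => hx (htv x h))
      rw [List.count_cons]
      conv_lhs => rw [hsplit]
      rw [List.count_append, h0, Nat.zero_add]
      simp [Ne.symm hx]
    rw [pvGroup]
    simp only [List.mem_cons]
    rw [hdw] at ih ⊢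
    rw [ih hdsort]
    constructor
    · rintro (rfl | ⟨hmem, hcount⟩)
      · refine ⟨Or.inl rfl, ?_⟩
        show (1 : Int) + run = ((v :: rest).count v : Int)
        rw [hcv]; push_cast; ring
      · have hxv : p.1 ≠ v := (hvd p.1 hmem).ne'
        refine ⟨Or.inr (hsplit ▸ List.mem_append_right _ hmem), ?_⟩
        rw [hcount, hcne p.1 hxv]
    · rintro ⟨hmem, hcount⟩
      by_cases hxv : p.1 = v
      · left
        have h2 : p.2 = 1 + (run : Int) := by
          rw [hcount, hxv, hcv]; push_cast; ring
        calc p = (p.1, p.2) := rfl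
          _ = (v, 1 + (run : Int)) := by rw [hxv, h2]
      · right
        have hmem' : p.1 ∈ rest := by
          rcases hmem with h | h
          · exact absurd h hxv
          · exact h
        have hmemd : p.1 ∈ rest.dropWhile (fun x => x == v) := by
          rcases List.mem_append.1 (hsplit ▸ hmem') with h | h
          · exact absurd (htv _ h) hxv
          · exact h
        exact ⟨hmemd, by rw [hcount, hcne p.1 hxv]⟩

theorem pv_group_keys_nodup (s : List Int) (hs : s.Pairwise (· ≤ ·)) :
    ((pvGroup s).map Prod.fst).Nodup := by
  induction s using pvGroup.induct with
  | case1 => simp [pvGroup]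
  | case2 v rest run ih =>
    rw [List.pairwise_cons] at hs
    have hdw := pv_dropWhile_eq_drop rest (fun x => x == v)
    have hdsort : (rest.dropWhile (fun x => x == v)).Pairwise (· ≤ ·) :=
      hs.2.sublist (List.dropWhile_sublist _)
    have hvd : ∀ x ∈ rest.dropWhile (fun x => x == v), v < x :=
      pv_lt_of_mem_dropWhile v rest hs.2 hs.1
    rw [pvGroup]
    simp only [List.map_cons, List.nodup_cons]
    rw [hdw] at ih ⊢
    refine ⟨?_, ih hdsort⟩
    intro hv
    rcases List.mem_map.1 hv with ⟨q, hq, hq1⟩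
    have := ((pv_group_mem _ hdsort q).1 hq).1
    rw [hq1] at this
    exact lt_irrefl v (hvd v this)

theorem pv_foldA_eq_counter (l : List Int) :
    l.foldl (fun (d : PySem.Dict Int Int) num =>
      if d.contains num = false then d.insert num 1
      else d.insert num (d.getD num 0 + 1)) PySem.Dict.empty = PySem.Dict.counter l := by
  have hf : (fun (d : PySem.Dict Int Int) num =>
      if d.contains num = false then d.insert num 1
      else d.insert num (d.getD num 0 + 1)) =
      (fun (d : PySem.Dict Int Int) num => d.insert num (d.getD num 0 + 1)) := by
    funext d x
    by_cases h : d.contains x = false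
    · rw [if_pos h, PySem.Dict.getD_of_not_contains (h := h), zero_add]
    · rw [if_neg h]
  rw [hf, PySem.Dict.foldl_insert_getD_add_one_eq_counter]

theorem pv_sorted2_eq_sorted_lex {α κ₁ κ₂ : Type} [LinearOrder κ₁] [LinearOrder κ₂]
    (xs : List α) (k1 : α → κ₁) (k2 : α → κ₂) :
    PySem.List.sorted2 xs k1 k2 = PySem.List.sorted xs (fun x => toLex (k1 x, k2 x)) := by
  rw [PySem.List.sorted_eq_foldl_insertBy]
  show List.foldl _ [] xs = _
  congr 1
  funext acc x
  congr 1
  funext a b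
  rcases lt_trichotomy (k1 a) (k1 b) with h | h | h
  · simp [Prod.Lex.lt_iff, h, asymm h]
  · simp [Prod.Lex.lt_iff, h]
  · have h1 : ¬ k1 a < k1 b := not_lt_of_gt h
    simp [Prod.Lex.lt_iff, h1, h.ne']
    exact fun hle => absurd hle (not_le.mpr h)

theorem pv_row_eq : pvDefineNewArr = pvRowPairs := by
  funext row
  show (PySem.List.sorted2
      ((row.filter (fun x => x != 0)).foldl
        (fun (d : PySem.Dict Int Int) num =>
          if d.contains num = false then d.insert num 1
          else d.insert num (d.getD num 0 + 1)) PySem.Dict.empty).items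
      (fun p => p.2) (fun p => p.1)).foldl (fun acc p => (acc ++ [p.1]) ++ [p.2]) []
    = List.flatMap (fun p => [p.1, p.2])
      (PySem.List.sorted2
        (pvGroup (PySem.List.sorted (row.filter (fun v => v != 0)) (fun y => y)))
        (fun p => p.2) (fun p => p.1))
  rw [pv_foldA_eq_counter]
  set f := row.filter (fun x => x != 0) with hf
  set vals := PySem.List.sorted f (fun y => y) with hvals
  have hperm_vals : vals.Perm f := PySem.List.sorted_perm f (fun y => y) false
  have hsorted : vals.Pairwise (· ≤ ·) := PySem.List.sorted_pairwise f (fun y => y)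
  have hitems : (PySem.Dict.counter f).items
      = (PySem.Set.ofList f).map (fun k => (k, (f.count k : Int))) :=
    PySem.Dict.items_counter f
  have hmemA : ∀ p : Int × Int, p ∈ (PySem.Dict.counter f).items
      ↔ p.1 ∈ f ∧ p.2 = (f.count p.1 : Int) := by
    intro p
    rw [hitems]
    constructor
    · intro hp
      rcases List.mem_map.1 hp with ⟨k, hk, rfl⟩
      exact ⟨(PySem.Set.mem_ofList _ _).1 hk, rfl⟩
    · rintro ⟨h1, h2⟩
      refine List.mem_map.2 ⟨p.1, (PySem.Set.mem_ofList _ _).2 h1, ?_⟩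
      exact Prod.ext rfl h2.symm
  have hmemB : ∀ p : Int × Int, p ∈ pvGroup vals
      ↔ p.1 ∈ f ∧ p.2 = (f.count p.1 : Int) := by
    intro p
    rw [pv_group_mem vals hsorted p, hperm_vals.mem_iff, hperm_vals.count_eq]
  have hnodupA : (PySem.Dict.counter f).items.Nodup := by
    apply List.Nodup.of_map Prod.fst
    rw [hitems, List.map_map]
    have : (Prod.fst ∘ fun k : Int => (k, (f.count k : Int))) = id := by
      funext k; rfl
    rw [this, List.map_id]
    exact PySem.Set.nodup_ofList f
  have hnodupB : (pvGroup vals).Nodup :=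
    List.Nodup.of_map Prod.fst (pv_group_keys_nodup vals hsorted)
  have hperm : (PySem.Dict.counter f).items.Perm (pvGroup vals) := by
    apply List.perm_of_nodup_nodup_toFinset_eq hnodupA hnodupB
    ext p
    simp only [List.mem_toFinset]
    rw [hmemA, hmemB]
  have hinj : Function.Injective (fun p : Int × Int => toLex (p.2, p.1)) := by
    intro a b h
    have h2 := congrArg ofLex h
    simp only [ofLex_toLex, Prod.mk.injEq] at h2
    exact Prod.ext h2.2 h2.1
  rw [pv_sorted2_eq_sorted_lex, pv_sorted2_eq_sorted_lex]
  rw [PySem.List.sorted_eq_sorted_of_perm _ _ _ hinj hperm]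
  rw [show (fun (acc : List Int) (p : Int × Int) => (acc ++ [p.1]) ++ [p.2])
      = (fun acc p => acc ++ [p.1, p.2]) from funext fun acc => funext fun p => by simp]
  rw [PySem.List.foldl_append_eq_flatMap]
  simp

-- ===== VERDICT (by name: the statement is the Claim_ definition above) =====
theorem sort_row_spec : Claim_equal_sort_row := by
  intro arr _hdom _hpre
  unfold Spec_sort_row sort_row sort_row_alt
  rw [pv_row_eq]
  rfl
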